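-- pv_equiv track=rewrite | github.com/SidthaarthG/agents_renumeration | src/combination_functions.py | portablity_premium_to_rewards
-- ===== SOURCE A (Python) =====
-- def portablity_premium_to_rewards(premium):
--
--     premium_ranges = [
--         (5001, 10000, 1200),
--         (10001, 15000, 1600),
--         (15001, 20000, 2500),
--         (20001, 25000, 3200),
--         (25001, 30000, 4000),
--         (30001, 40000, 4500),
--         (40001, 50000, 5000),
--         (50001, 75000, 7000),
--         (75001, 100000, 12000),
--         (100001, 200000, 16000),
--         (200001, 300000, 32000),
--         (300001, float('inf'), 46000)
--     ]
--     for i in range(len(premium_ranges)):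
--         if premium_ranges[i][0] <= premium <= premium_ranges[i][1]:
--             return premium_ranges[i][2]
--     return None
-- ===== SOURCE B (Python) =====
-- _LOWS = [5001, 10001, 15001, 20001, 25001, 30001, 40001, 50001, 75001, 100001, 200001, 300001]
-- _HIGHS = [10000, 15000, 20000, 25000, 30000, 40000, 50000, 75000, 100000, 200000, 300000, float('inf')]
-- _REWARDS = [1200, 1600, 2500, 3200, 4000, 4500, 5000, 7000, 12000, 16000, 32000, 46000]
--
--
-- def _bisect_right(a, x):
--     lo, hi = 0, len(a)
--     while lo < hi:
--         mid = (lo + hi) // 2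
--         if x < a[mid]:
--             hi = mid
--         else:
--             lo = mid + 1
--     return lo
--
--
-- def portablity_premium_to_rewards(premium):
--     i = _bisect_right(_LOWS, premium) - 1
--     if i < 0:
--         return None
--     if premium <= _HIGHS[i]:
--         return _REWARDS[i]
--     return None
-- ===== Notes on version B (the rewrite author's own statement) =====
-- stated objective: alternative
-- what changed: Replaces A's linear scan over the (low, high, reward) range table with a hand-written bisect_right binary search over the sorted lower bounds followed by a single upper-bound verification on the selected row.
import Mathlib
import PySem

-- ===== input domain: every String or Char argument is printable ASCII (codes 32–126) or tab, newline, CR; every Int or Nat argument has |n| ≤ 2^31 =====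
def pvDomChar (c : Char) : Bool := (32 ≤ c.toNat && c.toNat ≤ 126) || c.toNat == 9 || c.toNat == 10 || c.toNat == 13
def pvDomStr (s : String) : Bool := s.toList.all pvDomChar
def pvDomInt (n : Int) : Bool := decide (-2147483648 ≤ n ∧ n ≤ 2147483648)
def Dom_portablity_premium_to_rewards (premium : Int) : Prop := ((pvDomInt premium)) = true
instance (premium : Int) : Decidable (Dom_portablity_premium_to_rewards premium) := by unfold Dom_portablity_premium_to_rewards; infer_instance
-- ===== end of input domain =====

-- B replaces A's linear scan of the range table with a binary search over the
-- sorted lower bounds plus one upper-bound verification (alternative structure,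
-- same exact results).

-- ===== PORT A =====
-- 'premium <= upper' where the upper bound may be float('inf') (= none)
def pvLeHi (premium : Int) (hi : Option Int) : Bool :=
  match hi with
  | none => true
  | some h => premium ≤ h

-- the range table; 'float('inf')' as upper bound is represented by 'none' (no upper bound)
def pvRangesA : List (Int × Option Int × Int) :=
  [(5001, some 10000, 1200), (10001, some 15000, 1600), (15001, some 20000, 2500),
   (20001, some 25000, 3200), (25001, some 30000, 4000), (30001, some 40000, 4500),
   (40001, some 50000, 5000), (50001, some 75000, 7000), (75001, some 100000, 12000),
   (100001, some 200000, 16000), (200001, some 300000, 32000), (300001, none, 46000)]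

-- the 'for i in range(len(...))' scan with early return, as structural recursion over the table
def pvScanA (rs : List (Int × Option Int × Int)) (premium : Int) : Option Int :=
  match rs with
  | [] => none
  | (lo, hi, r) :: rest =>
      if lo ≤ premium ∧ pvLeHi premium hi then some r else pvScanA rest premium

def portablity_premium_to_rewards (premium : Int) : Option Int :=
  pvScanA pvRangesA premium

-- ===== PORT B =====
def pvLows : List Int :=
  [5001, 10001, 15001, 20001, 25001, 30001, 40001, 50001, 75001, 100001, 200001, 300001]
def pvHighs : List (Option Int) :=
  [some 10000, some 15000, some 20000, some 25000, some 30000, some 40000,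
   some 50000, some 75000, some 100000, some 200000, some 300000, none]
def pvRewards : List Int :=
  [1200, 1600, 2500, 3200, 4000, 4500, 5000, 7000, 12000, 16000, 32000, 46000]

-- Source B's hand-written _bisect_right while-loop, step for step
def pvBisectRight (a : List Int) (x : Int) (lo hi : Nat) : Nat :=
  if lo < hi then
    let mid := (lo + hi) / 2
    if x < a.getD mid 0 then pvBisectRight a x lo mid
    else pvBisectRight a x (mid + 1) hi
  else lo
termination_by hi - lo
decreasing_by all_goals omega

def portablity_premium_to_rewards_alt (premium : Int) : Option Int :=
  let i : Int := (pvBisectRight pvLows premium 0 pvLows.length : Int) - 1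
  if i < 0 then none
  else if pvLeHi premium (pvHighs.getD i.toNat none)
  then some (pvRewards.getD i.toNat 0)
  else none

-- ===== PRECONDITION & SPEC =====
def Spec_portablity_premium_to_rewards (premium : Int) (out : Option Int) : Prop := out = portablity_premium_to_rewards_alt premium
instance (premium : Int) (out : Option Int) : Decidable (Spec_portablity_premium_to_rewards premium out) := by unfold Spec_portablity_premium_to_rewards; infer_instance

-- ===== CLAIM (what is proved, stated in full; the proofs are below) =====
def Claim_equal_portablity_premium_to_rewards : Prop := ∀ (premium : Int), Dom_portablity_premium_to_rewards premium → Spec_portablity_premium_to_rewards premium (portablity_premium_to_rewards premium)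

-- ===== LEMMAS AND PROOFS =====

-- evaluation of the binary search on the concrete bounds table, as a chain of comparisons
set_option maxHeartbeats 2000000 in
lemma bisect_eval (x : Int) : pvBisectRight pvLows x 0 12 =
    (if x < 5001 then 0 else if x < 10001 then 1 else if x < 15001 then 2
     else if x < 20001 then 3 else if x < 25001 then 4 else if x < 30001 then 5
     else if x < 40001 then 6 else if x < 50001 then 7 else if x < 75001 then 8
     else if x < 100001 then 9 else if x < 200001 then 10 else if x < 300001 then 11
     else 12) := by
  repeat (rw [pvBisectRight.eq_def]; norm_num [pvLows])
  split_ifs <;> omega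

-- the common closed form both ports reduce to
def pvChain (x : Int) : Option Int :=
  if x < 5001 then none else if x < 10001 then some 1200 else if x < 15001 then some 1600
  else if x < 20001 then some 2500 else if x < 25001 then some 3200 else if x < 30001 then some 4000
  else if x < 40001 then some 4500 else if x < 50001 then some 5000 else if x < 75001 then some 7000
  else if x < 100001 then some 12000 else if x < 200001 then some 16000 else if x < 300001 then some 32000
  else some 46000

lemma scan_eval (x : Int) : pvScanA pvRangesA x = pvChain x := by
  simp only [pvScanA, pvRangesA, pvLeHi, pvChain, decide_eq_true_eq, and_true]
  rcases lt_or_ge x 5001 with h0 | h0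
  · simp only [eq_false (show ¬(5001 ≤ x ∧ x ≤ 10000) from by omega), eq_false (show ¬(10001 ≤ x ∧ x ≤ 15000) from by omega), eq_false (show ¬(15001 ≤ x ∧ x ≤ 20000) from by omega), eq_false (show ¬(20001 ≤ x ∧ x ≤ 25000) from by omega), eq_false (show ¬(25001 ≤ x ∧ x ≤ 30000) from by omega), eq_false (show ¬(30001 ≤ x ∧ x ≤ 40000) from by omega), eq_false (show ¬(40001 ≤ x ∧ x ≤ 50000) from by omega), eq_false (show ¬(50001 ≤ x ∧ x ≤ 75000) from by omega), eq_false (show ¬(75001 ≤ x ∧ x ≤ 100000) from by omega), eq_false (show ¬(100001 ≤ x ∧ x ≤ 200000) from by omega), eq_false (show ¬(200001 ≤ x ∧ x ≤ 300000) from by omega), eq_false (show ¬(300001 ≤ x) from by omega), eq_true (show x < 5001 from by omega), if_true, if_false]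
  rcases lt_or_ge x 10001 with h1 | h1
  · simp only [eq_true (show (5001 ≤ x ∧ x ≤ 10000) from by omega), eq_false (show ¬(x < 5001) from by omega), eq_true (show x < 10001 from by omega), if_true, if_false]
  rcases lt_or_ge x 15001 with h2 | h2
  · simp only [eq_false (show ¬(5001 ≤ x ∧ x ≤ 10000) from by omega), eq_true (show (10001 ≤ x ∧ x ≤ 15000) from by omega), eq_false (show ¬(x < 5001) from by omega), eq_false (show ¬(x < 10001) from by omega), eq_true (show x < 15001 from by omega), if_true, if_false]
  rcases lt_or_ge x 20001 with h3 | h3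
  · simp only [eq_false (show ¬(5001 ≤ x ∧ x ≤ 10000) from by omega), eq_false (show ¬(10001 ≤ x ∧ x ≤ 15000) from by omega), eq_true (show (15001 ≤ x ∧ x ≤ 20000) from by omega), eq_false (show ¬(x < 5001) from by omega), eq_false (show ¬(x < 10001) from by omega), eq_false (show ¬(x < 15001) from by omega), eq_true (show x < 20001 from by omega), if_true, if_false]
  rcases lt_or_ge x 25001 with h4 | h4
  · simp only [eq_false (show ¬(5001 ≤ x ∧ x ≤ 10000) from by omega), eq_false (show ¬(10001 ≤ x ∧ x ≤ 15000) from by omega), eq_false (show ¬(15001 ≤ x ∧ x ≤ 20000) from by omega), eq_true (show (20001 ≤ x ∧ x ≤ 25000) from by omega), eq_false (show ¬(x < 5001) from by omega), eq_false (show ¬(x < 10001) from by omega), eq_false (show ¬(x < 15001) from by omega), eq_false (show ¬(x < 20001) from by omega), eq_true (show x < 25001 from by omega), if_true, if_false]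
  rcases lt_or_ge x 30001 with h5 | h5
  · simp only [eq_false (show ¬(5001 ≤ x ∧ x ≤ 10000) from by omega), eq_false (show ¬(10001 ≤ x ∧ x ≤ 15000) from by omega), eq_false (show ¬(15001 ≤ x ∧ x ≤ 20000) from by omega), eq_false (show ¬(20001 ≤ x ∧ x ≤ 25000) from by omega), eq_true (show (25001 ≤ x ∧ x ≤ 30000) from by omega), eq_false (show ¬(x < 5001) from by omega), eq_false (show ¬(x < 10001) from by omega), eq_false (show ¬(x < 15001) from by omega), eq_false (show ¬(x < 20001) from by omega), eq_false (show ¬(x < 25001) from by omega), eq_true (show x < 30001 from by omega), if_true, if_false]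
  rcases lt_or_ge x 40001 with h6 | h6
  · simp only [eq_false (show ¬(5001 ≤ x ∧ x ≤ 10000) from by omega), eq_false (show ¬(10001 ≤ x ∧ x ≤ 15000) from by omega), eq_false (show ¬(15001 ≤ x ∧ x ≤ 20000) from by omega), eq_false (show ¬(20001 ≤ x ∧ x ≤ 25000) from by omega), eq_false (show ¬(25001 ≤ x ∧ x ≤ 30000) from by omega), eq_true (show (30001 ≤ x ∧ x ≤ 40000) from by omega), eq_false (show ¬(x < 5001) from by omega), eq_false (show ¬(x < 10001) from by omega), eq_false (show ¬(x < 15001) from by omega), eq_false (show ¬(x < 20001) from by omega), eq_false (show ¬(x < 25001) from by omega), eq_false (show ¬(x < 30001) from by omega), eq_true (show x < 40001 from by omega), if_true, if_false]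
  rcases lt_or_ge x 50001 with h7 | h7
  · simp only [eq_false (show ¬(5001 ≤ x ∧ x ≤ 10000) from by omega), eq_false (show ¬(10001 ≤ x ∧ x ≤ 15000) from by omega), eq_false (show ¬(15001 ≤ x ∧ x ≤ 20000) from by omega), eq_false (show ¬(20001 ≤ x ∧ x ≤ 25000) from by omega), eq_false (show ¬(25001 ≤ x ∧ x ≤ 30000) from by omega), eq_false (show ¬(30001 ≤ x ∧ x ≤ 40000) from by omega), eq_true (show (40001 ≤ x ∧ x ≤ 50000) from by omega), eq_false (show ¬(x < 5001) from by omega), eq_false (show ¬(x < 10001) from by omega), eq_false (show ¬(x < 15001) from by omega), eq_false (show ¬(x < 20001) from by omega), eq_false (show ¬(x < 25001) from by omega), eq_false (show ¬(x < 30001) from by omega), eq_false (show ¬(x < 40001) from by omega), eq_true (show x < 50001 from by omega), if_true, if_false]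
  rcases lt_or_ge x 75001 with h8 | h8
  · simp only [eq_false (show ¬(5001 ≤ x ∧ x ≤ 10000) from by omega), eq_false (show ¬(10001 ≤ x ∧ x ≤ 15000) from by omega), eq_false (show ¬(15001 ≤ x ∧ x ≤ 20000) from by omega), eq_false (show ¬(20001 ≤ x ∧ x ≤ 25000) from by omega), eq_false (show ¬(25001 ≤ x ∧ x ≤ 30000) from by omega), eq_false (show ¬(30001 ≤ x ∧ x ≤ 40000) from by omega), eq_false (show ¬(40001 ≤ x ∧ x ≤ 50000) from by omega), eq_true (show (50001 ≤ x ∧ x ≤ 75000) from by omega), eq_false (show ¬(x < 5001) from by omega), eq_false (show ¬(x < 10001) from by omega), eq_false (show ¬(x < 15001) from by omega), eq_false (show ¬(x < 20001) from by omega), eq_false (show ¬(x < 25001) from by omega), eq_false (show ¬(x < 30001) from by omega), eq_false (show ¬(x < 40001) from by omega), eq_false (show ¬(x < 50001) from by omega), eq_true (show x < 75001 from by omega), if_true, if_false]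
  rcases lt_or_ge x 100001 with h9 | h9
  · simp only [eq_false (show ¬(5001 ≤ x ∧ x ≤ 10000) from by omega), eq_false (show ¬(10001 ≤ x ∧ x ≤ 15000) from by omega), eq_false (show ¬(15001 ≤ x ∧ x ≤ 20000) from by omega), eq_false (show ¬(20001 ≤ x ∧ x ≤ 25000) from by omega), eq_false (show ¬(25001 ≤ x ∧ x ≤ 30000) from by omega), eq_false (show ¬(30001 ≤ x ∧ x ≤ 40000) from by omega), eq_false (show ¬(40001 ≤ x ∧ x ≤ 50000) from by omega), eq_false (show ¬(50001 ≤ x ∧ x ≤ 75000) from by omega), eq_true (show (75001 ≤ x ∧ x ≤ 100000) from by omega), eq_false (show ¬(x < 5001) from by omega), eq_false (show ¬(x < 10001) from by omega), eq_false (show ¬(x < 15001) from by omega), eq_false (show ¬(x < 20001) from by omega), eq_false (show ¬(x < 25001) from by omega), eq_false (show ¬(x < 30001) from by omega), eq_false (show ¬(x < 40001) from by omega), eq_false (show ¬(x < 50001) from by omega), eq_false (show ¬(x < 75001) from by omega), eq_true (show x < 100001 from by omega), if_true, if_false]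
  rcases lt_or_ge x 200001 with h10 | h10
  · simp only [eq_false (show ¬(5001 ≤ x ∧ x ≤ 10000) from by omega), eq_false (show ¬(10001 ≤ x ∧ x ≤ 15000) from by omega), eq_false (show ¬(15001 ≤ x ∧ x ≤ 20000) from by omega), eq_false (show ¬(20001 ≤ x ∧ x ≤ 25000) from by omega), eq_false (show ¬(25001 ≤ x ∧ x ≤ 30000) from by omega), eq_false (show ¬(30001 ≤ x ∧ x ≤ 40000) from by omega), eq_false (show ¬(40001 ≤ x ∧ x ≤ 50000) from by omega), eq_false (show ¬(50001 ≤ x ∧ x ≤ 75000) from by omega), eq_false (show ¬(75001 ≤ x ∧ x ≤ 100000) from by omega), eq_true (show (100001 ≤ x ∧ x ≤ 200000) from by omega), eq_false (show ¬(x < 5001) from by omega), eq_false (show ¬(x < 10001) from by omega), eq_false (show ¬(x < 15001) from by omega), eq_false (show ¬(x < 20001) from by omega), eq_false (show ¬(x < 25001) from by omega), eq_false (show ¬(x < 30001) from by omega), eq_false (show ¬(x < 40001) from by omega), eq_false (show ¬(x < 50001) from by omega), eq_false (show ¬(x < 75001) from by omega), eq_false (show ¬(x < 100001) from by omega), eq_true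 (show x < 200001 from by omega), if_true, if_false]
  rcases lt_or_ge x 300001 with h11 | h11
  · simp only [eq_false (show ¬(5001 ≤ x ∧ x ≤ 10000) from by omega), eq_false (show ¬(10001 ≤ x ∧ x ≤ 15000) from by omega), eq_false (show ¬(15001 ≤ x ∧ x ≤ 20000) from by omega), eq_false (show ¬(20001 ≤ x ∧ x ≤ 25000) from by omega), eq_false (show ¬(25001 ≤ x ∧ x ≤ 30000) from by omega), eq_false (show ¬(30001 ≤ x ∧ x ≤ 40000) from by omega), eq_false (show ¬(40001 ≤ x ∧ x ≤ 50000) from by omega), eq_false (show ¬(50001 ≤ x ∧ x ≤ 75000) from by omega), eq_false (show ¬(75001 ≤ x ∧ x ≤ 100000) from by omega), eq_false (show ¬(100001 ≤ x ∧ x ≤ 200000) from by omega), eq_true (show (200001 ≤ x ∧ x ≤ 300000) from by omega), eq_false (show ¬(x < 5001) from by omega), eq_false (show ¬(x < 10001) from by omega), eq_false (show ¬(x < 15001) from by omega), eq_false (show ¬(x < 20001) from by omega), eq_false (show ¬(x < 25001) from by omega), eq_false (show ¬(x < 30001) from by omega), eq_false (show ¬(x < 40001) from by omega), eq_false (show ¬(x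 < 50001) from by omega), eq_false (show ¬(x < 75001) from by omega), eq_false (show ¬(x < 100001) from by omega), eq_false (show ¬(x < 200001) from by omega), eq_true (show x < 300001 from by omega), if_true, if_false]
  · simp only [eq_false (show ¬(5001 ≤ x ∧ x ≤ 10000) from by omega), eq_false (show ¬(10001 ≤ x ∧ x ≤ 15000) from by omega), eq_false (show ¬(15001 ≤ x ∧ x ≤ 20000) from by omega), eq_false (show ¬(20001 ≤ x ∧ x ≤ 25000) from by omega), eq_false (show ¬(25001 ≤ x ∧ x ≤ 30000) from by omega), eq_false (show ¬(30001 ≤ x ∧ x ≤ 40000) from by omega), eq_false (show ¬(40001 ≤ x ∧ x ≤ 50000) from by omega), eq_false (show ¬(50001 ≤ x ∧ x ≤ 75000) from by omega), eq_false (show ¬(75001 ≤ x ∧ x ≤ 100000) from by omega), eq_false (show ¬(100001 ≤ x ∧ x ≤ 200000) from by omega), eq_false (show ¬(200001 ≤ x ∧ x ≤ 300000) from by omega), eq_true (show (300001 ≤ x) from by omega), eq_false (show ¬(x < 5001) from by omega), eq_false (show ¬(x < 10001) from by omega), eq_false (show ¬(x < 15001) from by omega), eq_false (show ¬(x < 20001)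 from by omega), eq_false (show ¬(x < 25001) from by omega), eq_false (show ¬(x < 30001) from by omega), eq_false (show ¬(x < 40001) from by omega), eq_false (show ¬(x < 50001) from by omega), eq_false (show ¬(x < 75001) from by omega), eq_false (show ¬(x < 100001) from by omega), eq_false (show ¬(x < 200001) from by omega), eq_false (show ¬(x < 300001) from by omega), if_true, if_false]

lemma alt_eval (x : Int) : portablity_premium_to_rewards_alt x = pvChain x := by
  unfold portablity_premium_to_rewards_alt pvChain
  rw [show pvLows.length = 12 from rfl, bisect_eval x]
  rcases lt_or_ge x 5001 with h0 | h0
  · simp only [eq_true (show x < 5001 from by omega), if_true, if_false]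
    norm_num
  rcases lt_or_ge x 10001 with h1 | h1
  · simp only [eq_false (show ¬(x < 5001) from by omega), eq_true (show x < 10001 from by omega), if_true, if_false]
    norm_num [pvHighs, pvRewards, pvLeHi]
    simp [show x ≤ 10000 from by omega]
  rcases lt_or_ge x 15001 with h2 | h2
  · simp only [eq_false (show ¬(x < 5001) from by omega), eq_false (show ¬(x < 10001) from by omega), eq_true (show x < 15001 from by omega), if_true, if_false]
    norm_num [pvHighs, pvRewards, pvLeHi]
    simp [show x ≤ 15000 from by omega]
  rcases lt_or_ge x 20001 with h3 | h3
  · simp only [eq_false (show ¬(x < 5001) from by omega), eq_false (show ¬(x < 10001) from by omega), eq_false (show ¬(x < 15001) from by omega), eq_true (show x < 20001 from by omega), if_true, if_false]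
    norm_num [pvHighs, pvRewards, pvLeHi]
    simp [show x ≤ 20000 from by omega]
  rcases lt_or_ge x 25001 with h4 | h4
  · simp only [eq_false (show ¬(x < 5001) from by omega), eq_false (show ¬(x < 10001) from by omega), eq_false (show ¬(x < 15001) from by omega), eq_false (show ¬(x < 20001) from by omega), eq_true (show x < 25001 from by omega), if_true, if_false]
    norm_num [pvHighs, pvRewards, pvLeHi]
    simp [show x ≤ 25000 from by omega]
  rcases lt_or_ge x 30001 with h5 | h5
  · simp only [eq_false (show ¬(x < 5001) from by omega), eq_false (show ¬(x < 10001) from by omega), eq_false (show ¬(x < 15001) from by omega), eq_false (show ¬(x < 20001) from by omega), eq_false (show ¬(x < 25001) from by omega), eq_true (show x < 30001 from by omega), if_true, if_false]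
    norm_num [pvHighs, pvRewards, pvLeHi]
    simp [show x ≤ 30000 from by omega]
  rcases lt_or_ge x 40001 with h6 | h6
  · simp only [eq_false (show ¬(x < 5001) from by omega), eq_false (show ¬(x < 10001) from by omega), eq_false (show ¬(x < 15001) from by omega), eq_false (show ¬(x < 20001) from by omega), eq_false (show ¬(x < 25001) from by omega), eq_false (show ¬(x < 30001) from by omega), eq_true (show x < 40001 from by omega), if_true, if_false]
    norm_num [pvHighs, pvRewards, pvLeHi]
    simp [show x ≤ 40000 from by omega]
  rcases lt_or_ge x 50001 with h7 | h7
  · simp only [eq_false (show ¬(x < 5001) from by omega), eq_false (show ¬(x < 10001) from by omega), eq_false (show ¬(x < 15001) from by omega), eq_false (show ¬(x < 20001) from by omega), eq_false (show ¬(x < 25001) from by omega), eq_false (show ¬(x < 30001) from by omega), eq_false (show ¬(x < 40001) from by omega), eq_true (show x < 50001 from by omega), if_true, if_false]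
    norm_num [pvHighs, pvRewards, pvLeHi]
    simp [show x ≤ 50000 from by omega]
  rcases lt_or_ge x 75001 with h8 | h8
  · simp only [eq_false (show ¬(x < 5001) from by omega), eq_false (show ¬(x < 10001) from by omega), eq_false (show ¬(x < 15001) from by omega), eq_false (show ¬(x < 20001) from by omega), eq_false (show ¬(x < 25001) from by omega), eq_false (show ¬(x < 30001) from by omega), eq_false (show ¬(x < 40001) from by omega), eq_false (show ¬(x < 50001) from by omega), eq_true (show x < 75001 from by omega), if_true, if_false]
    norm_num [pvHighs, pvRewards, pvLeHi]
    simp [show x ≤ 75000 from by omega]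
  rcases lt_or_ge x 100001 with h9 | h9
  · simp only [eq_false (show ¬(x < 5001) from by omega), eq_false (show ¬(x < 10001) from by omega), eq_false (show ¬(x < 15001) from by omega), eq_false (show ¬(x < 20001) from by omega), eq_false (show ¬(x < 25001) from by omega), eq_false (show ¬(x < 30001) from by omega), eq_false (show ¬(x < 40001) from by omega), eq_false (show ¬(x < 50001) from by omega), eq_false (show ¬(x < 75001) from by omega), eq_true (show x < 100001 from by omega), if_true, if_false]
    norm_num [pvHighs, pvRewards, pvLeHi]
    simp [show x ≤ 100000 from by omega]
  rcases lt_or_ge x 200001 with h10 | h10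
  · simp only [eq_false (show ¬(x < 5001) from by omega), eq_false (show ¬(x < 10001) from by omega), eq_false (show ¬(x < 15001) from by omega), eq_false (show ¬(x < 20001) from by omega), eq_false (show ¬(x < 25001) from by omega), eq_false (show ¬(x < 30001) from by omega), eq_false (show ¬(x < 40001) from by omega), eq_false (show ¬(x < 50001) from by omega), eq_false (show ¬(x < 75001) from by omega), eq_false (show ¬(x < 100001) from by omega), eq_true (show x < 200001 from by omega), if_true, if_false]
    norm_num [pvHighs, pvRewards, pvLeHi]
    simp [show x ≤ 200000 from by omega]
  rcases lt_or_ge x 300001 with h11 | h11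
  · simp only [eq_false (show ¬(x < 5001) from by omega), eq_false (show ¬(x < 10001) from by omega), eq_false (show ¬(x < 15001) from by omega), eq_false (show ¬(x < 20001) from by omega), eq_false (show ¬(x < 25001) from by omega), eq_false (show ¬(x < 30001) from by omega), eq_false (show ¬(x < 40001) from by omega), eq_false (show ¬(x < 50001) from by omega), eq_false (show ¬(x < 75001) from by omega), eq_false (show ¬(x < 100001) from by omega), eq_false (show ¬(x < 200001) from by omega), eq_true (show x < 300001 from by omega), if_true, if_false]
    norm_num [pvHighs, pvRewards, pvLeHi]
    simp [show x ≤ 300000 from by omega]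
  · simp only [eq_false (show ¬(x < 5001) from by omega), eq_false (show ¬(x < 10001) from by omega), eq_false (show ¬(x < 15001) from by omega), eq_false (show ¬(x < 20001) from by omega), eq_false (show ¬(x < 25001) from by omega), eq_false (show ¬(x < 30001) from by omega), eq_false (show ¬(x < 40001) from by omega), eq_false (show ¬(x < 50001) from by omega), eq_false (show ¬(x < 75001) from by omega), eq_false (show ¬(x < 100001) from by omega), eq_false (show ¬(x < 200001) from by omega), eq_false (show ¬(x < 300001) from by omega), if_true, if_false]
    norm_num [pvHighs, pvRewards, pvLeHi]
    simp

-- ===== VERDICT (by name: the statement is the Claim_ definition above) =====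
theorem portablity_premium_to_rewards_spec : Claim_equal_portablity_premium_to_rewards := by
  intro premium _
  unfold Spec_portablity_premium_to_rewards portablity_premium_to_rewards
  rw [scan_eval, alt_eval]
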